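-- pv_equiv track=rewrite | github.com/johndoyle/brewing-mcp | packages/mcp-grocy/src/mcp_grocy/tools.py | _get_yeast_equivalents
-- ===== SOURCE A (Python) =====
-- YEAST_EQUIVALENTS = {
--     # American Ale / Chico strain
--     "us-05": ["wlp001", "wyeast 1056", "1056", "safale us-05", "bry-97"],
--     "wlp001": ["us-05", "wyeast 1056", "1056", "safale us-05"],
--     "1056": ["us-05", "wlp001", "safale us-05"],
--     # English Ale
--     "s-04": ["wlp007", "wyeast 1098", "1098"],
--     "wlp007": ["s-04", "wyeast 1098", "1098"],
--     "1098": ["s-04", "wlp007"],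
--     # Belgian Abbey
--     "m47": ["wlp550", "wyeast 3522", "3522"],
--     "wlp550": ["m47", "wyeast 3522", "3522"],
--     "3522": ["m47", "wlp550"],
--     # German Lager
--     "w-34/70": ["wlp830", "wyeast 2124", "2124", "s-189"],
--     "s-189": ["w-34/70", "wlp830", "wyeast 2124"],
--     "wlp830": ["w-34/70", "s-189", "wyeast 2124"],
--     "2124": ["w-34/70", "s-189", "wlp830"],
--     # Hefeweizen
--     "wlp300": ["wyeast 3068", "3068"],
--     "3068": ["wlp300"],
--     # Kveik
--     "oyl-061": ["voss kveik"],
-- }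
--
-- def _normalize_yeast_id(yeast_id: str) -> str:
--     """Normalize a yeast ID for comparison."""
--     if not yeast_id:
--         return ""
--     # Remove spaces and hyphens, lowercase
--     return yeast_id.lower().replace("-", "").replace(" ", "")
--
-- def _get_yeast_equivalents(yeast_id: str) -> list[str]:
--     """Get list of equivalent yeast strains for a given ID."""
--     normalized = _normalize_yeast_id(yeast_id)
--
--     for key, equivalents in YEAST_EQUIVALENTS.items():
--         if _normalize_yeast_id(key) == normalized:
--             return equivalents
--         if normalized in [_normalize_yeast_id(e) for e in equivalents]:
--             # Return the key plus other equivalents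
--             return [key] + [e for e in equivalents if _normalize_yeast_id(e) != normalized]
--
--     return []
-- ===== SOURCE B (Python) =====
-- # Precomputed lookup table: normalized strain ID -> equivalents, derived once
-- # from the equivalence groups; lookup is a single dict access instead of a table scan.
-- _YEAST_INDEX = {
--     'us05': ['wlp001', 'wyeast 1056', '1056', 'safale us-05', 'bry-97'],
--     'wlp001': ['us-05', 'wyeast 1056', '1056', 'safale us-05', 'bry-97'],
--     'wyeast1056': ['us-05', 'wlp001', '1056', 'safale us-05', 'bry-97'],
--     '1056': ['us-05', 'wlp001', 'wyeast 1056', 'safale us-05', 'bry-97'],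
--     'safaleus05': ['us-05', 'wlp001', 'wyeast 1056', '1056', 'bry-97'],
--     'bry97': ['us-05', 'wlp001', 'wyeast 1056', '1056', 'safale us-05'],
--     's04': ['wlp007', 'wyeast 1098', '1098'],
--     'wlp007': ['s-04', 'wyeast 1098', '1098'],
--     'wyeast1098': ['s-04', 'wlp007', '1098'],
--     '1098': ['s-04', 'wlp007', 'wyeast 1098'],
--     'm47': ['wlp550', 'wyeast 3522', '3522'],
--     'wlp550': ['m47', 'wyeast 3522', '3522'],
--     'wyeast3522': ['m47', 'wlp550', '3522'],
--     '3522': ['m47', 'wlp550', 'wyeast 3522'],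
--     'w34/70': ['wlp830', 'wyeast 2124', '2124', 's-189'],
--     'wlp830': ['w-34/70', 'wyeast 2124', '2124', 's-189'],
--     'wyeast2124': ['w-34/70', 'wlp830', '2124', 's-189'],
--     '2124': ['w-34/70', 'wlp830', 'wyeast 2124', 's-189'],
--     's189': ['w-34/70', 'wlp830', 'wyeast 2124', '2124'],
--     'wlp300': ['wyeast 3068', '3068'],
--     'wyeast3068': ['wlp300', '3068'],
--     '3068': ['wlp300', 'wyeast 3068'],
--     'oyl061': ['voss kveik'],
--     'vosskveik': ['oyl-061'],
-- }
--
-- # single-pass normalization table: lowercase ASCII letters, delete '-' and ' '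
-- _NORM_TABLE = str.maketrans(
--     "ABCDEFGHIJKLMNOPQRSTUVWXYZ", "abcdefghijklmnopqrstuvwxyz", "- "
-- )
--
--
-- def _normalize_yeast_id(yeast_id: str) -> str:
--     """Normalize a yeast ID for comparison (one pass over the characters)."""
--     return yeast_id.translate(_NORM_TABLE)
--
--
-- def _get_yeast_equivalents(yeast_id: str) -> list[str]:
--     """Get list of equivalent yeast strains for a given ID."""
--     equivalents = _YEAST_INDEX.get(_normalize_yeast_id(yeast_id))
--     return equivalents if equivalents is not None else []
-- ===== Notes on version B (the rewrite author's own statement) =====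
-- stated objective: simpler
-- what changed: B replaces A's per-call scan of YEAST_EQUIVALENTS (which re-normalizes every key and equivalent and rebuilds the filtered list on each call) with a precomputed dict from normalized ID to result list, so the lookup body is one normalization plus one dict access; normalization itself becomes a single str.translate pass instead of lower() plus two replace() passes.
import Mathlib
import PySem

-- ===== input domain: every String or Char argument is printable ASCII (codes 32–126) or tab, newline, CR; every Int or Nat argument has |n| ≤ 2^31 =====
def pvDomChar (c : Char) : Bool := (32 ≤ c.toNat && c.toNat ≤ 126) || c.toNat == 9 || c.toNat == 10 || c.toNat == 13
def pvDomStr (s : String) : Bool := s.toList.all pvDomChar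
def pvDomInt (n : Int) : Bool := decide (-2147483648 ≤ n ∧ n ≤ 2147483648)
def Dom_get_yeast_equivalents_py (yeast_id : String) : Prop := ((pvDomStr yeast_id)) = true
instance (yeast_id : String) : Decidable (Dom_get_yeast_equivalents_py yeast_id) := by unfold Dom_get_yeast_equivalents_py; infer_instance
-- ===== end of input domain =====

-- B replaces A's per-call scan of the equivalence table (re-normalizing every entry each call)
-- by a precomputed index dict plus a single-pass per-character normalization; lookup is one dict access.

-- ===== PORT A =====
def normalize_yeast_id (yeast_id : String) : String :=
  if yeast_id = "" then ""
  else PySem.Str.replace (PySem.Str.replace (PySem.Str.lower yeast_id) "-" "") " " ""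

def yeastEquivalents : List (String × List String) := [
  ("us-05", ["wlp001", "wyeast 1056", "1056", "safale us-05", "bry-97"]),
  ("wlp001", ["us-05", "wyeast 1056", "1056", "safale us-05"]),
  ("1056", ["us-05", "wlp001", "safale us-05"]),
  ("s-04", ["wlp007", "wyeast 1098", "1098"]),
  ("wlp007", ["s-04", "wyeast 1098", "1098"]),
  ("1098", ["s-04", "wlp007"]),
  ("m47", ["wlp550", "wyeast 3522", "3522"]),
  ("wlp550", ["m47", "wyeast 3522", "3522"]),
  ("3522", ["m47", "wlp550"]),
  ("w-34/70", ["wlp830", "wyeast 2124", "2124", "s-189"]),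
  ("s-189", ["w-34/70", "wlp830", "wyeast 2124"]),
  ("wlp830", ["w-34/70", "s-189", "wyeast 2124"]),
  ("2124", ["w-34/70", "s-189", "wlp830"]),
  ("wlp300", ["wyeast 3068", "3068"]),
  ("3068", ["wlp300"]),
  ("oyl-061", ["voss kveik"])]

-- the loop of A: first group whose key or equivalent list matches, key checked first
def lookupA (normalized : String) : List (String × List String) → List String
  | [] => []
  | (key, equivalents) :: rest =>
    if normalize_yeast_id key = normalized then equivalents
    else if normalized ∈ equivalents.map normalize_yeast_id then
      key :: equivalents.filter (fun e => normalize_yeast_id e ≠ normalized)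
    else lookupA normalized rest

def get_yeast_equivalents_py (yeast_id : String) : List String :=
  lookupA (normalize_yeast_id yeast_id) yeastEquivalents

-- ===== PORT B =====
-- B's normalization: one pass over the characters, dropping '-' and ' ' and lowercasing each kept char
def normChars : List Char → List Char
  | [] => []
  | c :: rest =>
    if c = '-' || c = ' ' then normChars rest
    else PySem.Chars.lowerChar c :: normChars rest

-- B's precomputed index: normalized strain ID -> equivalents list (dict.get: none = absent)
def yeastLookup : String → Option (List String)
  | "us05" => some ["wlp001", "wyeast 1056", "1056", "safale us-05", "bry-97"]
  | "wlp001" => some ["us-05", "wyeast 1056", "1056", "safale us-05", "bry-97"]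
  | "wyeast1056" => some ["us-05", "wlp001", "1056", "safale us-05", "bry-97"]
  | "1056" => some ["us-05", "wlp001", "wyeast 1056", "safale us-05", "bry-97"]
  | "safaleus05" => some ["us-05", "wlp001", "wyeast 1056", "1056", "bry-97"]
  | "bry97" => some ["us-05", "wlp001", "wyeast 1056", "1056", "safale us-05"]
  | "s04" => some ["wlp007", "wyeast 1098", "1098"]
  | "wlp007" => some ["s-04", "wyeast 1098", "1098"]
  | "wyeast1098" => some ["s-04", "wlp007", "1098"]
  | "1098" => some ["s-04", "wlp007", "wyeast 1098"]
  | "m47" => some ["wlp550", "wyeast 3522", "3522"]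
  | "wlp550" => some ["m47", "wyeast 3522", "3522"]
  | "wyeast3522" => some ["m47", "wlp550", "3522"]
  | "3522" => some ["m47", "wlp550", "wyeast 3522"]
  | "w34/70" => some ["wlp830", "wyeast 2124", "2124", "s-189"]
  | "wlp830" => some ["w-34/70", "wyeast 2124", "2124", "s-189"]
  | "wyeast2124" => some ["w-34/70", "wlp830", "2124", "s-189"]
  | "2124" => some ["w-34/70", "wlp830", "wyeast 2124", "s-189"]
  | "s189" => some ["w-34/70", "wlp830", "wyeast 2124", "2124"]
  | "wlp300" => some ["wyeast 3068", "3068"]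
  | "wyeast3068" => some ["wlp300", "3068"]
  | "3068" => some ["wlp300", "wyeast 3068"]
  | "oyl061" => some ["voss kveik"]
  | "vosskveik" => some ["oyl-061"]
  | _ => none

def get_yeast_equivalents_py_alt (yeast_id : String) : List String :=
  match yeastLookup (String.mk (normChars yeast_id.toList)) with
  | some eq => eq
  | none => []

-- ===== PRECONDITION & SPEC =====
def Spec_get_yeast_equivalents_py (yeast_id : String) (out : List String) : Prop := out = get_yeast_equivalents_py_alt yeast_id
instance (yeast_id : String) (out : List String) : Decidable (Spec_get_yeast_equivalents_py yeast_id out) := by unfold Spec_get_yeast_equivalents_py; infer_instance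

-- ===== CLAIM (what is proved, stated in full; the proofs are below) =====
def Claim_equal_get_yeast_equivalents_py : Prop := ∀ (yeast_id : String), Dom_get_yeast_equivalents_py yeast_id → Spec_get_yeast_equivalents_py yeast_id (get_yeast_equivalents_py yeast_id)

-- ===== LEMMAS AND PROOFS =====

-- Chars.replace with a one-char pattern and empty replacement is a filter
theorem replace_go_single (d : Char) :
    ∀ (fuel : Nat) (l acc : List Char), l.length ≤ fuel →
      PySem.Chars.replace.go [d] [] fuel l acc = acc.reverse ++ l.filter (fun c => c ≠ d) := by
  intro fuel
  induction fuel with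
  | zero =>
    intro l acc h
    have : l = [] := List.length_eq_zero_iff.mp (Nat.le_zero.mp h)
    subst this
    simp [PySem.Chars.replace.go]
  | succ n ih =>
    intro l acc h
    cases l with
    | nil => simp [PySem.Chars.replace.go]
    | cons c t =>
      simp only [PySem.Chars.replace.go]
      by_cases hc : c = d
      · subst hc
        have hp : [c].isPrefixOf (c :: t) = true := by simp [List.isPrefixOf]
        rw [if_pos hp]
        simp only [List.length_cons] at h
        rw [ih _ _ (by simp; omega)]
        simp
      · have hp : [d].isPrefixOf (c :: t) = false := by
          simp [List.isPrefixOf]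
          exact fun h' => (hc h'.symm).elim
        rw [if_neg (by simp [hp])]
        simp only [List.length_cons] at h
        rw [ih _ _ (by omega)]
        simp [hc]

theorem replace_single (d : Char) (l : List Char) :
    PySem.Chars.replace l [d] [] = l.filter (fun c => c ≠ d) := by
  simp only [PySem.Chars.replace, List.isEmpty_cons]
  exact replace_go_single d l.length l [] le_rfl

theorem char_eq_iff (c d : Char) : c = d ↔ c.toNat = d.toNat := by
  rw [Char.ext_iff]
  change _ ↔ c.val.toNat = d.val.toNat
  exact (UInt32.toNat_inj).symm
theorem char_le_toNat {c d : Char} (h : c ≤ d) : c.toNat ≤ d.toNat := by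
  rw [Char.le_def] at h
  exact UInt32.le_iff_toNat_le.mp h
theorem toNat_ofNat (n : Nat) (h : n < 0xd800) : (Char.ofNat n).toNat = n := by
  simp only [Char.ofNat, Char.toNat]
  split
  · rfl
  · omega
theorem lowerChar_ne_special (c d : Char) (hd : d.toNat = 45 ∨ d.toNat = 32) :
    decide (PySem.Chars.lowerChar c ≠ d) = decide (c ≠ d) := by
  simp only [PySem.Chars.lowerChar]
  by_cases hu : 'A' ≤ c ∧ c ≤ 'Z'
  · have hiu : PySem.Chars.isupper c = true := by simp [PySem.Chars.isupper, hu.1, hu.2]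
    simp only [hiu, if_true]
    have h1 : 65 ≤ c.toNat := char_le_toNat hu.1
    have h2 : c.toNat ≤ 90 := char_le_toNat hu.2
    have hof : (Char.ofNat (c.toNat + 32)).toNat = c.toNat + 32 := toNat_ofNat _ (by omega)
    have e1 : Char.ofNat (c.toNat + 32) ≠ d := by
      rw [Ne, char_eq_iff, hof]; omega
    have e2 : c ≠ d := by rw [Ne, char_eq_iff]; omega
    simp [e1, e2]
  · have hiu : PySem.Chars.isupper c = false := by
      simp [PySem.Chars.isupper]
      intro h1
      by_contra hlt
      exact hu ⟨h1, not_lt.mp hlt⟩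
    simp [hiu]
theorem normChars_eq (cs : List Char) :
    normChars cs = ((cs.map PySem.Chars.lowerChar).filter (fun c => c ≠ '-')).filter (fun c => c ≠ ' ') := by
  induction cs with
  | nil => simp [normChars]
  | cons c t ih =>
    simp only [normChars, List.map_cons, List.filter_cons,
      lowerChar_ne_special c '-' (Or.inl rfl)]
    by_cases h1 : c = '-'
    · simp [h1, ih]
    · by_cases h2 : c = ' '
      · simp [h2, ih, show PySem.Chars.lowerChar ' ' = ' ' by decide]
      · have hns : PySem.Chars.lowerChar c ≠ ' ' := by
          have h := lowerChar_ne_special c ' ' (Or.inr rfl)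
          simp [h2] at h
          exact h
        simp [h1, h2, hns, ih]

theorem normalize_eq_normChars (s : String) :
    normalize_yeast_id s = String.mk (normChars s.toList) := by
  by_cases he : s = ""
  · subst he; simp [normalize_yeast_id, normChars]; rfl
  · have : (normalize_yeast_id s).toList = normChars s.toList := by
      simp only [normalize_yeast_id, if_neg he]
      rw [PySem.Str.toList_replace, PySem.Str.toList_replace, PySem.Str.toList_lower]
      show PySem.Chars.replace (PySem.Chars.replace (PySem.Chars.lower s.toList) ['-'] []) [' '] [] = _
      rw [replace_single, PySem.Chars.lower, replace_single, normChars_eq]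
    apply String.toList_inj.mp
    rw [this]
    show normChars s.toList = (String.ofList (normChars s.toList)).toList
    exact String.toList_ofList.symm

-- the keys of the index (every normalized ID occurring in the table)
def yeastIndexKeys : List String := ["us05", "wlp001", "wyeast1056", "1056", "safaleus05", "bry97", "s04", "wlp007", "wyeast1098", "1098", "m47", "wlp550", "wyeast3522", "3522", "w34/70", "wlp830", "wyeast2124", "2124", "s189", "wlp300", "wyeast3068", "3068", "oyl061", "vosskveik"]

theorem norm_0 : normalize_yeast_id "us-05" = "us05" := by decide
theorem norm_1 : normalize_yeast_id "wlp001" = "wlp001" := by decide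
theorem norm_2 : normalize_yeast_id "wyeast 1056" = "wyeast1056" := by decide
theorem norm_3 : normalize_yeast_id "1056" = "1056" := by decide
theorem norm_4 : normalize_yeast_id "safale us-05" = "safaleus05" := by decide
theorem norm_5 : normalize_yeast_id "bry-97" = "bry97" := by decide
theorem norm_6 : normalize_yeast_id "s-04" = "s04" := by decide
theorem norm_7 : normalize_yeast_id "wlp007" = "wlp007" := by decide
theorem norm_8 : normalize_yeast_id "wyeast 1098" = "wyeast1098" := by decide
theorem norm_9 : normalize_yeast_id "1098" = "1098" := by decide
theorem norm_10 : normalize_yeast_id "m47" = "m47" := by decide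
theorem norm_11 : normalize_yeast_id "wlp550" = "wlp550" := by decide
theorem norm_12 : normalize_yeast_id "wyeast 3522" = "wyeast3522" := by decide
theorem norm_13 : normalize_yeast_id "3522" = "3522" := by decide
theorem norm_14 : normalize_yeast_id "w-34/70" = "w34/70" := by decide
theorem norm_15 : normalize_yeast_id "wlp830" = "wlp830" := by decide
theorem norm_16 : normalize_yeast_id "wyeast 2124" = "wyeast2124" := by decide
theorem norm_17 : normalize_yeast_id "2124" = "2124" := by decide
theorem norm_18 : normalize_yeast_id "s-189" = "s189" := by decide
theorem norm_19 : normalize_yeast_id "wlp300" = "wlp300" := by decide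
theorem norm_20 : normalize_yeast_id "wyeast 3068" = "wyeast3068" := by decide
theorem norm_21 : normalize_yeast_id "3068" = "3068" := by decide
theorem norm_22 : normalize_yeast_id "oyl-061" = "oyl061" := by decide
theorem norm_23 : normalize_yeast_id "voss kveik" = "vosskveik" := by decide

set_option maxRecDepth 8192 in
theorem lookup_eq (n : String) :
    lookupA n yeastEquivalents = (yeastLookup n).getD [] := by
  by_cases h : n ∈ yeastIndexKeys
  · fin_cases h <;> decide
  · simp only [yeastIndexKeys, List.mem_cons, List.not_mem_nil, or_false, not_or] at h
    obtain ⟨h0, h1, h2, h3, h4, h5, h6, h7, h8, h9, h10, h11, h12, h13, h14, h15, h16, h17, h18, h19, h20, h21, h22, h23⟩ := h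
    simp [lookupA, yeastEquivalents, yeastLookup, norm_0, norm_1, norm_2, norm_3, norm_4, norm_5, norm_6, norm_7, norm_8, norm_9, norm_10, norm_11, norm_12, norm_13, norm_14, norm_15, norm_16, norm_17, norm_18, norm_19, norm_20, norm_21, norm_22, norm_23, h0, Ne.symm h0, h1, Ne.symm h1, h2, h3, Ne.symm h3, h4, h5, h6, Ne.symm h6, h7, Ne.symm h7, h8, h9, Ne.symm h9, h10, Ne.symm h10, h11, Ne.symm h11, h12, h13, Ne.symm h13, h14, Ne.symm h14, h15, Ne.symm h15, h16, h17, Ne.symm h17, h18, Ne.symm h18, h19, Ne.symm h19, h20, h21, Ne.symm h21, Ne.symm h22, h23]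

-- ===== VERDICT (by name: the statement is the Claim_ definition above) =====
theorem get_yeast_equivalents_py_spec : Claim_equal_get_yeast_equivalents_py := by
  intro y _
  unfold Spec_get_yeast_equivalents_py get_yeast_equivalents_py get_yeast_equivalents_py_alt
  rw [← normalize_eq_normChars]
  have h := lookup_eq (normalize_yeast_id y)
  rw [h]
  cases yeastLookup (normalize_yeast_id y) <;> rfl
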